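-- pv_equiv track=rewrite | github.com/zkjzou/mini-swe-agent | src/minisweagent/run/utils/trajectory.py | messages_to_steps
-- ===== SOURCE A (Python) =====
-- from typing import Any
--
-- def messages_to_steps(messages: list[dict[str, Any]]) -> list[list[dict[str, Any]]]:
--     """Group messages into steps, where each step ends with a user message."""
--     steps: list[list[dict[str, Any]]] = []
--     current_step: list[dict[str, Any]] = []
--     for message in messages:
--         current_step.append(message)
--         if message.get("role") == "user":
--             steps.append(current_step)
--             current_step = []
--     if current_step:
--         steps.append(current_step)
--     return steps
-- ===== SOURCE B (Python) =====
-- def messages_to_steps(messages: list[dict[str, any]]) -> list[list[dict[str, any]]]: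
--     """Group messages into steps, where each step ends with a user message."""
--     steps: list[list[dict[str, any]]] = []
--     rest = messages
--     while True:
--         j = next((k for k, m in enumerate(rest) if m.get("role") == "user"), None)
--         if j is None:
--             break
--         steps.append(rest[:j + 1])
--         rest = rest[j + 1:]
--     if rest:
--         steps.append(rest)
--     return steps
-- ===== Notes on version B (the rewrite author's own statement) =====
-- stated objective: alternative
-- what changed: B repeatedly finds the index of the next user message and splits that whole segment off by slicing in an outer while loop, instead of A's element-by-element pass that accumulates and flushes a current_step list.
import Mathlib
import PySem

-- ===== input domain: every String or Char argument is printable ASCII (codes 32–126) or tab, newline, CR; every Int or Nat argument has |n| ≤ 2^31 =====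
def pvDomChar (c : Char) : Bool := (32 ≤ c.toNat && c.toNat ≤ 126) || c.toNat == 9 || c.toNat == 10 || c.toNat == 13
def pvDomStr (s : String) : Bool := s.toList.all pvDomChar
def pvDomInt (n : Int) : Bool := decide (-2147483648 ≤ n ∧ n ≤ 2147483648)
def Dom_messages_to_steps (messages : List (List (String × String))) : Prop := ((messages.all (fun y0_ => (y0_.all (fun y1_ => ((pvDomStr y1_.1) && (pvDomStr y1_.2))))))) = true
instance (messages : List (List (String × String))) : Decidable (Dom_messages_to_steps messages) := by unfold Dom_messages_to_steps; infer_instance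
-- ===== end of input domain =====

-- B splits off whole segments by finding the next user-message index and slicing, in an outer
-- while loop, instead of A's per-element accumulate-and-flush pass; same O(n) cost (objective: alternative).

-- ===== PORT A =====
-- A's loop: state (steps, current_step); append message, flush on role == "user"; flush trailing.
def messages_to_steps (messages : List (List (String × String))) : List (List (List (String × String))) :=
  let st := messages.foldl
    (fun (acc : List (List (List (String × String))) × List (List (String × String))) message =>
      let cur := acc.2 ++ [message]
      -- message.get("role"): first-match lookup on the association list (the dict convention)
      if message.lookup "role" == some "user" then (acc.1 ++ [cur], []) else (acc.1, cur))
    ([], [])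
  if st.2 ≠ [] then st.1 ++ [st.2] else st.1

-- ===== PORT B =====
-- next((k for k, m in enumerate(rest) if m.get("role") == "user"), None): index of first user message
def pvFindUser : List (List (String × String)) → Option Nat
  | [] => none
  | m :: rest => if m.lookup "role" == some "user" then some 0 else (pvFindUser rest).map (· + 1)

-- B's while loop, as recursion on rest; rest[:j+1] / rest[j+1:] with the nonnegative bound j+1
-- are exactly List.take / List.drop. After the loop: `if rest: steps.append(rest)`.
def pvLoopB (steps : List (List (List (String × String)))) (rest : List (List (String × String))) :
    List (List (List (String × String))) :=
  match h : pvFindUser rest with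
  | none => if rest ≠ [] then steps ++ [rest] else steps
  | some j => pvLoopB (steps ++ [rest.take (j + 1)]) (rest.drop (j + 1))
termination_by rest.length
decreasing_by
  cases rest with
  | nil => simp [pvFindUser] at h
  | cons a l => simp

def messages_to_steps_alt (messages : List (List (String × String))) : List (List (List (String × String))) :=
  pvLoopB [] messages

-- ===== PRECONDITION & SPEC =====
def Spec_messages_to_steps (messages : List (List (String × String))) (out : List (List (List (String × String)))) : Prop := out = messages_to_steps_alt messages
instance (messages : List (List (String × String))) (out : List (List (List (String × String)))) : Decidable (Spec_messages_to_steps messages out) := by unfold Spec_messages_to_steps; infer_instance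

-- ===== CLAIM (what is proved, stated in full; the proofs are below) =====
def Claim_equal_messages_to_steps : Prop := ∀ (messages : List (List (String × String))), Dom_messages_to_steps messages → Spec_messages_to_steps messages (messages_to_steps messages)

-- ===== LEMMAS AND PROOFS =====

-- A's loop body (exactly the lambda in messages_to_steps)
def pvStepA (acc : List (List (List (String × String))) × List (List (String × String)))
    (message : List (String × String)) :
    List (List (List (String × String))) × List (List (String × String)) :=
  let cur := acc.2 ++ [message]
  if message.lookup "role" == some "user" then (acc.1 ++ [cur], []) else (acc.1, cur)

-- if no user message occurs in xs, A's loop just appends xs to current_step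
lemma pvA_find_none : ∀ (xs : List (List (String × String)))
    (steps : List (List (List (String × String)))) (cur : List (List (String × String))),
    pvFindUser xs = none → xs.foldl pvStepA (steps, cur) = (steps, cur ++ xs) := by
  intro xs
  induction xs with
  | nil => intro steps cur _; simp
  | cons m rest ih =>
    intro steps cur h
    simp only [pvFindUser] at h
    by_cases hu : m.lookup "role" == some "user"
    · simp [hu] at h
    · simp only [hu] at h
      rw [List.foldl_cons]
      have hr : pvFindUser rest = none := by
        cases hfr : pvFindUser rest with
        | none => rfl
        | some k => rw [hfr] at h; simp at h
      have : pvStepA (steps, cur) m = (steps, cur ++ [m]) := by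
        simp [pvStepA, hu]
      rw [this, ih _ _ hr]
      simp

-- if the first user message of xs is at index j, A's loop flushes cur ++ xs[:j+1] and continues on xs[j+1:]
lemma pvA_find_some : ∀ (xs : List (List (String × String))) (j : Nat)
    (steps : List (List (List (String × String)))) (cur : List (List (String × String))),
    pvFindUser xs = some j →
    xs.foldl pvStepA (steps, cur)
      = (xs.drop (j + 1)).foldl pvStepA (steps ++ [cur ++ xs.take (j + 1)], []) := by
  intro xs
  induction xs with
  | nil => intro j steps cur h; simp [pvFindUser] at h
  | cons m rest ih =>
    intro j steps cur h
    simp only [pvFindUser] at h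
    by_cases hu : m.lookup "role" == some "user"
    · simp only [hu, if_pos] at h
      have hj : j = 0 := by simpa using h.symm
      subst hj
      rw [List.foldl_cons]
      have : pvStepA (steps, cur) m = (steps ++ [cur ++ [m]], []) := by
        simp [pvStepA, hu]
      rw [this]
      simp
    · simp only [hu] at h
      cases hfr : pvFindUser rest with
      | none => rw [hfr] at h; simp at h
      | some k =>
        rw [hfr] at h
        have hj : j = k + 1 := by simpa using h.symm
        subst hj
        rw [List.foldl_cons]
        have hst : pvStepA (steps, cur) m = (steps, cur ++ [m]) := by
          simp [pvStepA, hu]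
        rw [hst, ih k steps (cur ++ [m]) hfr]
        simp

-- main invariant: A's loop-then-flush from (steps, []) equals B's pvLoopB steps
lemma pvMain : ∀ (n : Nat) (rest : List (List (String × String)))
    (steps : List (List (List (String × String)))), rest.length ≤ n →
    (let st := rest.foldl pvStepA (steps, [])
     if st.2 ≠ [] then st.1 ++ [st.2] else st.1) = pvLoopB steps rest := by
  intro n
  induction n with
  | zero =>
    intro rest steps hlen
    have : rest = [] := List.eq_nil_of_length_eq_zero (by omega)
    subst this
    rw [pvLoopB]
    simp [pvFindUser]
  | succ n ih =>
    intro rest steps hlen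
    rw [pvLoopB]
    split
    · rename_i hf
      rw [pvA_find_none rest steps [] hf]
      simp only [List.nil_append]
    · rename_i j hf
      simp only [pvA_find_some rest j steps [] hf, List.nil_append]
      apply ih
      have hpos : 0 < rest.length := by
        cases rest with
        | nil => simp [pvFindUser] at hf
        | cons a l => simp
      simp only [List.length_drop]
      omega

-- ===== VERDICT (by name: the statement is the Claim_ definition above) =====
theorem messages_to_steps_spec : Claim_equal_messages_to_steps := by
  intro messages _
  unfold Spec_messages_to_steps messages_to_steps messages_to_steps_alt
  exact pvMain messages.length messages [] (le_refl _)
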